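-- pv_equiv track=rewrite | github.com/Pancio-code/Fondamenti-informatica-I | esami/Esonero20191105/Soluzioni/CompitoF/Eserc2/F_Ex2.py | F_Ex2
-- ===== SOURCE A (Python) =====
-- def F_Ex2(s):
--     con=0
--     for i in range(len(s)):
--         if i==0 and s[i]=='b':
--             con=con+1
--         elif i!=0 and s[i]=='b':
--             if s[i-1]!='b':
--                 con=con+1
--     return s.count('b')-con
-- ===== SOURCE B (Python) =====
-- def F_Ex2(s):
--     return sum(1 for x, y in zip(s, s[1:]) if x == 'b' and y == 'b')
-- ===== Notes on version B (the rewrite author's own statement) =====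
-- stated objective: simpler
-- what changed: Instead of counting run-starts of the letter b with index arithmetic and subtracting them from s.count's total, B counts adjacent equal-b pairs directly in one pass over zip(s, s[1:]), with no indexing and no separate count() call.
import Mathlib
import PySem

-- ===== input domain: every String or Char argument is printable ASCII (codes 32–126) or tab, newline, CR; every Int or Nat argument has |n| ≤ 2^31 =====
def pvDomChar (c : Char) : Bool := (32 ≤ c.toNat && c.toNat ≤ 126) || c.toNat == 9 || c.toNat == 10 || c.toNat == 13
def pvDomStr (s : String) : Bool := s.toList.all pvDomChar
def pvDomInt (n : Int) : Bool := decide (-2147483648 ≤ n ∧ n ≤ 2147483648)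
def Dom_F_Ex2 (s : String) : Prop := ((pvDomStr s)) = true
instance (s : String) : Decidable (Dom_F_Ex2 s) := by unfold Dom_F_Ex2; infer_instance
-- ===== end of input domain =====

-- B counts adjacent ('b','b') pairs directly over zip(s, s[1:]) in one pass,
-- instead of A's run-start count subtracted from s.count('b'); objective: simpler.

-- ===== PORT A =====
-- loop body of A: for i in range(len(s)) with s[i], s[i-1] (indices always in range here)
def F_Ex2_stepA (l : List Char) (con : Int) (i : Int) : Int :=
  if i = 0 ∧ PySem.List.pyGetD l i ' ' = 'b' then con + 1
  else if i ≠ 0 ∧ PySem.List.pyGetD l i ' ' = 'b' then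
    (if PySem.List.pyGetD l (i - 1) ' ' ≠ 'b' then con + 1 else con)
  else con

def F_Ex2 (s : String) : Int :=
  (PySem.Str.count s "b" : Int)
    - (PySem.List.pyRange 0 (s.toList.length : Int) 1).foldl (F_Ex2_stepA s.toList) 0

-- ===== PORT B =====
def F_Ex2_alt (s : String) : Int :=
  ((s.toList.zip (PySem.Str.slice s (some 1) none).toList).countP
      (fun p => p.1 == 'b' && p.2 == 'b') : Int)

-- ===== PRECONDITION & SPEC =====
def Spec_F_Ex2 (s : String) (out : Int) : Prop := out = F_Ex2_alt s
instance (s : String) (out : Int) : Decidable (Spec_F_Ex2 s out) := by unfold Spec_F_Ex2; infer_instance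

-- ===== CLAIM (what is proved, stated in full; the proofs are below) =====
def Claim_equal_F_Ex2 : Prop := ∀ (s : String), Dom_F_Ex2 s → Spec_F_Ex2 s (F_Ex2 s)

-- ===== LEMMAS AND PROOFS =====

-- s.count('b') for the one-char pattern is the char count
theorem count_go_singleton (c : Char) (l : List Char) :
    ∀ (fuel acc : Nat), l.length ≤ fuel →
      PySem.Chars.count.go [c] fuel l acc = acc + l.count c := by
  induction l with
  | nil =>
      intro fuel acc _
      cases fuel <;> simp [PySem.Chars.count.go]
  | cons h t ih =>
      intro fuel acc hle
      cases fuel with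
      | zero => simp at hle
      | succ f =>
        by_cases hb : h = c
        · simp [PySem.Chars.count.go, hb, List.isPrefixOf, ih f (acc + 1) (by simpa using hle)]
          omega
        · simp [PySem.Chars.count.go, List.isPrefixOf, hb, Ne.symm hb,
            ih f acc (by simpa using hle)]

theorem chars_count_singleton (l : List Char) (c : Char) :
    PySem.Chars.count l [c] = l.count c := by
  simp only [PySem.Chars.count, List.isEmpty_cons, Bool.false_eq_true, if_false]
  simpa using count_go_singleton c l l.length 0 le_rfl

-- consecutive pairs of xs ++ [c]
theorem zip_tail_append (xs : List Char) (c : Char) :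
    (xs ++ [c]).zip (xs ++ [c]).tail
      = xs.zip xs.tail ++ (match xs.getLast? with
          | some p => [(p, c)]
          | none => ([] : List (Char × Char))) := by
  induction xs with
  | nil => simp
  | cons x xs ih =>
      cases xs with
      | nil => simp
      | cons y ys =>
        simp only [List.cons_append, List.tail_cons, List.zip_cons_cons] at *
        simp [ih]

-- the loop invariant: after processing i = 0..n-1, con = #b's in take n − #('b','b') pairs in take n
theorem conFold_eq (l : List Char) :
    ∀ (n : Nat), n ≤ l.length →
      (PySem.List.pyRange 0 (n : Int) 1).foldl (F_Ex2_stepA l) 0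
        = (((l.take n).count 'b' : Int)
            - (((l.take n).zip (l.take n).tail).countP (fun p => p.1 == 'b' && p.2 == 'b') : Int)) := by
  intro n
  induction n with
  | zero => intro _; simp [PySem.List.pyRange_one_eq_nil]
  | succ n ih =>
      intro hle
      have hn : n < l.length := by omega
      have hcast : ((n + 1 : Nat) : Int) = (n : Int) + 1 := by push_cast; ring
      rw [hcast, PySem.List.pyRange_one_succ_right (by positivity), List.foldl_append]
      rw [ih (by omega)]
      have htake : l.take (n + 1) = l.take n ++ [l[n]] := by
        rw [List.take_add_one]
        simp [List.getElem?_eq_getElem hn]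
      have hget : PySem.List.pyGetD l (n : Int) ' ' = l[n] := by
        rw [PySem.List.pyGetD_natCast]
        simp [List.getD, List.getElem?_eq_getElem hn]
      cases n with
      | zero =>
          -- first iteration: i = 0
          rw [Nat.cast_zero] at hget
          simp only [F_Ex2_stepA, List.foldl_cons, List.foldl_nil]
          rw [htake]
          by_cases hb : l[0] = 'b' <;> simp [hget, hb]
      | succ m =>
          have hm : m < l.length := by omega
          have hgetprev : PySem.List.pyGetD l (((m + 1 : Nat) : Int) - 1) ' ' = l[m] := by
            have : ((m + 1 : Nat) : Int) - 1 = ((m : Nat) : Int) := by push_cast; ring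
            rw [this, PySem.List.pyGetD_natCast]
            simp [List.getD, List.getElem?_eq_getElem hm]
          have hlast : (l.take (m + 1)).getLast? = some l[m] := by
            rw [List.getLast?_eq_getElem?]
            have hlen : (l.take (m + 1)).length = m + 1 := by
              simp [List.length_take]; omega
            rw [hlen]
            simp [List.getElem?_take, List.getElem?_eq_getElem hm]
          rw [htake]
          simp only [F_Ex2_stepA, List.foldl_cons, List.foldl_nil, hget, hgetprev,
            zip_tail_append, hlast, List.count_append, List.countP_append]
          have hne : ((m + 1 : Nat) : Int) ≠ 0 := by positivity
          by_cases hb : l[m + 1] = 'b' <;> by_cases hp : l[m] = 'b' <;>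
            simp [hb, hp, hne] <;> push_cast <;> omega

-- ===== VERDICT (by name: the statement is the Claim_ definition above) =====
theorem F_Ex2_spec : Claim_equal_F_Ex2 := by
  intro s _
  unfold Spec_F_Ex2 F_Ex2 F_Ex2_alt
  rw [conFold_eq s.toList s.toList.length le_rfl, List.take_length,
    PySem.Str.count_eq, show ("b" : String).toList = ['b'] from rfl, chars_count_singleton,
    show (PySem.Str.slice s (some 1) none).toList = s.toList.tail from by
      simp [PySem.Str.slice, PySem.List.slice_from]]
  ring
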